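-- pv_equiv track=rewrite | github.com/i960107/algorithm | baekjoon/시각.py | solution
-- ===== SOURCE A (Python) =====
-- def solution(N: int) -> int:
--     res = 0
--
--     for h in range(N + 1):
--
--         if h in [3, 13, 23]:
--             res += 3600
--         else:
--             res += (45 * 15 + 15 * 60)
--
--     return res
-- ===== SOURCE B (Python) =====
-- def solution(N: int) -> int:
--     if N < 0:
--         return 0
--     special = sum(1 for h in (3, 13, 23) if h <= N)
--     return (N + 1) * 1575 + 2025 * special
-- ===== Notes on version B (the rewrite author's own statement) =====
-- stated objective: faster
-- what changed: Replaces the O(N) loop over hours with a closed-form formula: (N+1)*1575 plus 2025 for each special hour in {3,13,23} that is <= N.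
import Mathlib
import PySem

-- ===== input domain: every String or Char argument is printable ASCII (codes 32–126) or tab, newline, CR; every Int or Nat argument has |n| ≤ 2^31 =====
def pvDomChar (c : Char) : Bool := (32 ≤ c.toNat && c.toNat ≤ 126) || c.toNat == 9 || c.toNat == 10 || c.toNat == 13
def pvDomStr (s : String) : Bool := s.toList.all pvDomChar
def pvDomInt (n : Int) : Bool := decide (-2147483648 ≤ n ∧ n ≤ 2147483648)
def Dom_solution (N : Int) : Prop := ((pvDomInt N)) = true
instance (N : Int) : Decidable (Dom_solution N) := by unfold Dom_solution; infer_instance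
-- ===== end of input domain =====

-- B replaces A's per-hour loop with a closed-form formula (objective: faster, O(1) vs O(N)).

-- ===== PORT A =====
def solution (N : Int) : Int :=
  (PySem.List.pyRange 0 (N + 1) 1).foldl
    (fun res h => if h ∈ [(3 : Int), 13, 23] then res + 3600 else res + (45 * 15 + 15 * 60)) 0

-- ===== PORT B =====
def solution_alt (N : Int) : Int :=
  if N < 0 then 0
  else
    let special : Int := ([(3 : Int), 13, 23].filter (fun h => h ≤ N)).length
    (N + 1) * 1575 + 2025 * special

-- ===== PRECONDITION & SPEC =====
def Spec_solution (N : Int) (out : Int) : Prop := out = solution_alt N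
instance (N : Int) (out : Int) : Decidable (Spec_solution N out) := by unfold Spec_solution; infer_instance

-- ===== CLAIM (what is proved, stated in full; the proofs are below) =====
def Claim_equal_solution : Prop := ∀ (N : Int), Dom_solution N → Spec_solution N (solution N)

-- ===== LEMMAS AND PROOFS =====

-- A's fold adds a constant depending only on the element; shift of initial accumulator.
theorem pv_foldl_shift (l : List Int) (c : Int) :
    l.foldl (fun res h => if h ∈ [(3 : Int), 13, 23] then res + 3600 else res + (45 * 15 + 15 * 60)) c
      = c + l.foldl (fun res h => if h ∈ [(3 : Int), 13, 23] then res + 3600 else res + (45 * 15 + 15 * 60)) 0 := by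
  induction l generalizing c with
  | nil => simp
  | cons x xs ih =>
    simp only [List.foldl_cons]
    rw [ih, ih (if x ∈ [(3 : Int), 13, 23] then (0 : Int) + 3600 else 0 + (45 * 15 + 15 * 60))]
    split_ifs <;> ring

theorem pv_main (N : Int) (hN : 0 ≤ N) : solution N = solution_alt N := by
  induction N, hN using Int.le_induction with
  | base =>
    decide
  | succ n hn ih =>
    have ih' := ih
    unfold solution at ih' ⊢
    rw [PySem.List.pyRange_one_succ_right (by omega : (0 : Int) ≤ n + 1),
        List.foldl_append, pv_foldl_shift]
    rw [show ((PySem.List.pyRange 0 (n + 1) 1).foldl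
      (fun res h => if h ∈ [(3 : Int), 13, 23] then res + 3600 else res + (45 * 15 + 15 * 60)) 0) = solution_alt n from ih']
    unfold solution_alt
    simp only [List.foldl_cons, List.foldl_nil, if_neg (by omega : ¬ n + 1 < 0), if_neg (by omega : ¬ (n:Int) < 0)]
    by_cases h3 : (n + 1 : Int) = 3
    · have : n = 2 := by omega
      subst this; decide
    · by_cases h13 : (n + 1 : Int) = 13
      · have : n = 12 := by omega
        subst this; decide
      · by_cases h23 : (n + 1 : Int) = 23
        · have : n = 22 := by omega
          subst this; decide
        · have hm : ¬ (n + 1 : Int) ∈ [(3 : Int), 13, 23] := by simp [h3, h13, h23]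
          rw [if_neg hm]
          have e3 : ((3:Int) ≤ n + 1) = ((3:Int) ≤ n) := by
            by_cases h : (3:Int) ≤ n
            · simp [h, show (3:Int) ≤ n + 1 by omega]
            · simp [h, show ¬ (3:Int) ≤ n + 1 by omega]
          have e13 : ((13:Int) ≤ n + 1) = ((13:Int) ≤ n) := by
            by_cases h : (13:Int) ≤ n
            · simp [h, show (13:Int) ≤ n + 1 by omega]
            · simp [h, show ¬ (13:Int) ≤ n + 1 by omega]
          have e23 : ((23:Int) ≤ n + 1) = ((23:Int) ≤ n) := by
            by_cases h : (23:Int) ≤ n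
            · simp [h, show (23:Int) ≤ n + 1 by omega]
            · simp [h, show ¬ (23:Int) ≤ n + 1 by omega]
          simp only [List.filter, e3, e13, e23]
          ring

-- ===== VERDICT (by name: the statement is the Claim_ definition above) =====
theorem solution_spec : Claim_equal_solution := by
  intro N _
  unfold Spec_solution
  by_cases h : 0 ≤ N
  · exact pv_main N h
  · unfold solution solution_alt
    rw [PySem.List.pyRange_one_eq_nil (by omega)]
    simp [show N < 0 by omega]
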